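-- pv_equiv track=rewrite | github.com/Koeunseooooo/Algorithm | 프로그래머스/고득점Kit-스택큐/기능개발.py | solution
-- ===== SOURCE A (Python) =====
-- def solution(progresses, speeds):
--     answer = []
--     # 앞타임보다 내가 더 빠르면 앞타임 애의 숫자로 스택을 넣자
--     remains =[]
--     stack = []
--
--     for p,s in zip(progresses,speeds):
--         r=(100-p)//s
--         if (100-p)%s !=0:
--             r=r+1
--         remains.append(r)
--
--     for r in remains:
--         if stack:
--             if stack[-1]<r:
--                 stack.append(r)
--             else:
--                 stack.append(stack[-1])
--         else:
--             stack.append(r)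
--
--     days=sorted(set(stack)) #sorted를 하면 set이 list로 바뀜
--
--     for d in days:
--         answer.append(stack.count(d))
--
--     return answer
-- ===== SOURCE B (Python) =====
-- def solution(progresses, speeds):
--     # Single pass: the day a feature ships is the running max of its own
--     # remaining days; count lengths of consecutive equal runs of that max.
--     answer = []
--     cur = None
--     cnt = 0
--     for p, s in zip(progresses, speeds):
--         r = (100 - p) // s
--         if (100 - p) % s != 0:
--             r += 1
--         if cur is None or r > cur:
--             if cnt:
--                 answer.append(cnt)
--             cur = r
--             cnt = 1
--         else:
--             cnt += 1
--     if cnt: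
--         answer.append(cnt)
--     return answer
-- ===== Notes on version B (the rewrite author's own statement) =====
-- stated objective: faster
-- what changed: Replaced A's three passes (build a running-max stack, sorted(set(stack)), then stack.count(d) for every distinct day) by a single pass that tracks the running max of the remaining-days values and counts lengths of consecutive equal runs.
import Mathlib
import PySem

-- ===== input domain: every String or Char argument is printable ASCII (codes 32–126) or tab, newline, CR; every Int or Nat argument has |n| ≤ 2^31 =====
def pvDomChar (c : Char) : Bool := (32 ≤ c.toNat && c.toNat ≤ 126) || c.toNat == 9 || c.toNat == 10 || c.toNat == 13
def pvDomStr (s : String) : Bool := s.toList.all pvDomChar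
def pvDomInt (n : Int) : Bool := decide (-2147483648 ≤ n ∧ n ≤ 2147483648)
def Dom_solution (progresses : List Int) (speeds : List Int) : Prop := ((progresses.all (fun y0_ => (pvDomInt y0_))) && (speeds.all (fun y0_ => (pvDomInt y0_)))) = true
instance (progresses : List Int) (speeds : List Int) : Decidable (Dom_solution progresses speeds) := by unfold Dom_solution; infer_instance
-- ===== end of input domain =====

-- B replaces A's three passes (running-max stack, sorted(set(stack)), stack.count per distinct day)
-- by one pass counting consecutive equal runs of the running max.

-- ===== PORT A =====
-- r = (100-p)//s, +1 if the remainder is nonzero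
def pvRemainA (p s : Int) : Int :=
  let r := PySem.Int.floordiv (100 - p) s
  if PySem.Int.mod (100 - p) s ≠ 0 then r + 1 else r

-- one step of A's stack-building loop ('if stack: … stack[-1] …')
def pvStackStep (st : List Int) (r : Int) : List Int :=
  match st.getLast? with
  | some t => if t < r then st ++ [r] else st ++ [t]
  | none => st ++ [r]

def solution (progresses : List Int) (speeds : List Int) : List Int :=
  let remains := (progresses.zip speeds).foldl (fun acc ps => acc ++ [pvRemainA ps.1 ps.2]) []
  let stack := remains.foldl pvStackStep []
  let days := PySem.List.sorted (PySem.Set.ofList stack) (fun x => x) false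
  days.foldl (fun ans d => ans ++ [(PySem.List.count stack d : Int)]) []

-- ===== PORT B =====
def pvRemainB (p s : Int) : Int :=
  let r := PySem.Int.floordiv (100 - p) s
  if PySem.Int.mod (100 - p) s ≠ 0 then r + 1 else r

-- one step of B's loop; state = (answer, cur, cnt)
def pvRunStep (st : List Int × Option Int × Int) (r : Int) : List Int × Option Int × Int :=
  match st with
  | (ans, cur, cnt) =>
    let newRun : Bool := match cur with | none => true | some c => decide (c < r)
    if newRun then ((if cnt ≠ 0 then ans ++ [cnt] else ans), some r, 1)
    else (ans, cur, cnt + 1)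

def solution_alt (progresses : List Int) (speeds : List Int) : List Int :=
  match (progresses.zip speeds).foldl (fun st ps => pvRunStep st (pvRemainB ps.1 ps.2))
      (([] : List Int), (none : Option Int), (0 : Int)) with
  | (ans, _, cnt) => if cnt ≠ 0 then ans ++ [cnt] else ans

-- ===== PRECONDITION & SPEC =====
-- Pre_ excludes exactly the inputs where the Python raises ZeroDivisionError: a zipped speed equal to 0.
def Pre_solution (progresses : List Int) (speeds : List Int) : Prop :=
  ∀ ps ∈ progresses.zip speeds, ps.2 ≠ 0

instance (progresses : List Int) (speeds : List Int) : Decidable (Pre_solution progresses speeds) := by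
  unfold Pre_solution; infer_instance

def pvWitness_solution : List Int × List Int := ([93, 30, 55], [1, 30, 5])

def Spec_solution (progresses : List Int) (speeds : List Int) (out : List Int) : Prop := out = solution_alt progresses speeds
instance (progresses : List Int) (speeds : List Int) (out : List Int) : Decidable (Spec_solution progresses speeds out) := by unfold Spec_solution; infer_instance

-- ===== CLAIM (what is proved, stated in full; the proofs are below) =====
def Claim_equal_solution : Prop := ∀ (progresses : List Int) (speeds : List Int), Dom_solution progresses speeds → Pre_solution progresses speeds → Spec_solution progresses speeds (solution progresses speeds)

-- ===== LEMMAS AND PROOFS =====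

-- running-max continuation: the stack after its first element, as a function of the last value
def pvScan (c : Int) : List Int → List Int
  | [] => []
  | r :: rest => let c' := if c < r then r else c; c' :: pvScan c' rest

-- run lengths of a list, carried by B's (cur, cnt) state
def pvRunAux (c : Int) (cnt : Int) : List Int → List Int
  | [] => [cnt]
  | r :: rest => if c < r then cnt :: pvRunAux r 1 rest else pvRunAux c (cnt + 1) rest

-- B's final 'if cnt: answer.append(cnt)'
def pvFinish (st : List Int × Option Int × Int) : List Int :=
  if st.2.2 ≠ 0 then st.1 ++ [st.2.2] else st.1

theorem pvScan_pairwise (rs : List Int) (c : Int) : (c :: pvScan c rs).Pairwise (· ≤ ·) := by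
  induction rs generalizing c with
  | nil => simp [pvScan]
  | cons r rest ih =>
    simp only [pvScan]
    have h := List.pairwise_cons.mp (ih (if c < r then r else c))
    rw [List.pairwise_cons]
    refine ⟨?_, ih _⟩
    intro y hy
    rcases List.mem_cons.mp hy with h1 | h2
    · subst h1; split <;> omega
    · have := h.1 y h2
      split at this <;> omega

theorem pvStack_eq (rs : List Int) (st : List Int) (c : Int)
    (h : st.getLast? = some c) : rs.foldl pvStackStep st = st ++ pvScan c rs := by
  induction rs generalizing st c with
  | nil => simp [pvScan]
  | cons r rest ih =>
    simp only [List.foldl_cons, pvScan]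
    rw [pvStackStep, h]
    dsimp only
    by_cases hc : c < r
    · rw [if_pos hc, ih (st ++ [r]) r (by simp)]
      simp [hc]
    · rw [if_neg hc, ih (st ++ [c]) c (by simp)]
      simp [hc]

theorem pvRun_eq (rs : List Int) (ans : List Int) (c cnt : Int) (h : 0 < cnt) :
    pvFinish (rs.foldl pvRunStep (ans, some c, cnt)) = ans ++ pvRunAux c cnt (pvScan c rs) := by
  induction rs generalizing ans c cnt with
  | nil => simp [pvFinish, pvRunAux, pvScan]; omega
  | cons r rest ih =>
    simp only [List.foldl_cons, pvScan, pvRunStep]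
    by_cases hc : c < r
    · rw [if_pos (by simp [hc]), if_pos (by omega : cnt ≠ 0)]
      rw [ih (ans ++ [cnt]) r 1 (by norm_num)]
      simp [pvRunAux, hc]
    · rw [if_neg (by simp [hc])]
      rw [ih ans c (cnt + 1) (by omega)]
      simp [pvRunAux, hc]

theorem pvSorted_set_cons (x : Int) (rest : List Int)
    (hge : ∀ y ∈ rest, x ≤ y) :
    PySem.List.sorted (PySem.Set.ofList (x :: rest)) (fun y => y) false
      = x :: PySem.List.sorted (PySem.Set.ofList (rest.filter (fun y => decide (x < y)))) (fun y => y) false := by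
  apply PySem.List.sorted_eq_of_perm_of_pairwise_lt
  · have hn1 : (x :: PySem.List.sorted (PySem.Set.ofList (rest.filter (fun y => decide (x < y)))) (fun y => y) false).Nodup := by
      rw [List.nodup_cons]
      constructor
      · intro hx
        rw [PySem.List.mem_sorted, PySem.Set.mem_ofList, List.mem_filter] at hx
        simp at hx
      · exact ((PySem.List.sorted_perm _ _ _).nodup_iff).mpr (PySem.Set.nodup_ofList _)
    rw [List.perm_ext_iff_of_nodup hn1 (PySem.Set.nodup_ofList _)]
    intro a
    simp only [List.mem_cons, PySem.List.mem_sorted, PySem.Set.mem_ofList, List.mem_filter]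
    constructor
    · rintro (rfl | ⟨ha, _⟩)
      · exact Or.inl rfl
      · exact Or.inr ha
    · rintro (rfl | ha)
      · exact Or.inl rfl
      · by_cases hx : x < a
        · exact Or.inr ⟨ha, by simpa using hx⟩
        · left; have := hge a ha; omega
  · rw [List.pairwise_cons]
    constructor
    · intro y hy
      rw [PySem.List.mem_sorted, PySem.Set.mem_ofList, List.mem_filter] at hy
      simpa using hy.2
    · exact PySem.List.sorted_ofList_pairwise_lt _

theorem pvCount_eq (t : List Int) (c cnt : Int)
    (hp : t.Pairwise (· ≤ ·)) (hge : ∀ y ∈ t, c ≤ y) :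
    pvRunAux c cnt t
      = (cnt + (t.count c : Int))
        :: (PySem.List.sorted (PySem.Set.ofList (t.filter (fun y => decide (c < y)))) (fun y => y) false).map
             (fun d => (t.count d : Int)) := by
  induction t generalizing c cnt with
  | nil => simp [pvRunAux, PySem.Set.ofList, PySem.List.sorted]
  | cons x rest ih =>
    rw [List.pairwise_cons] at hp
    have hxrest := hp.1
    by_cases hc : c < x
    · have hnot : c ∉ x :: rest := by
        intro hmem
        rcases List.mem_cons.mp hmem with rfl | hm
        · omega
        · have := hxrest c hm; omega
      rw [pvRunAux, if_pos hc]
      have hfilter : (x :: rest).filter (fun y => decide (c < y)) = x :: rest := by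
        apply List.filter_eq_self.mpr
        intro a ha
        rcases List.mem_cons.mp ha with rfl | hm
        · simpa using hc
        · have := hxrest a hm; simp; omega
      rw [hfilter, List.count_eq_zero.mpr hnot]
      have hmain := ih x 1 hp.2 hxrest
      rw [pvSorted_set_cons x rest hxrest]
      rw [hmain]
      simp only [List.map_cons]
      congr 1
      · simp
      congr 1
      · rw [List.count_cons_self]; push_cast; ring
      · apply List.map_congr_left
        intro d hd
        rw [PySem.List.mem_sorted, PySem.Set.mem_ofList, List.mem_filter] at hd
        have : x ≠ d := by have := hd.2; simp at this; omega
        rw [List.count_cons_of_ne (by simpa using this)]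
    · have hxc : x = c := by have := hge x (by simp); omega
      subst hxc
      rw [pvRunAux, if_neg hc]
      rw [ih x (cnt + 1) hp.2 hxrest]
      have hfilter : (x :: rest).filter (fun y => decide (x < y)) = rest.filter (fun y => decide (x < y)) := by
        rw [List.filter_cons]; simp
      rw [hfilter]
      congr 1
      · rw [List.count_cons_self]; push_cast; ring
      · apply List.map_congr_left
        intro d hd
        rw [PySem.List.mem_sorted, PySem.Set.mem_ofList, List.mem_filter] at hd
        have : x ≠ d := by have := hd.2; simp at this; omega
        rw [List.count_cons_of_ne (by simpa using this)]

-- A's answer on the remains list rs equals B's run-count loop on rs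
theorem pvMain (rs : List Int) :
    (PySem.List.sorted (PySem.Set.ofList (rs.foldl pvStackStep [])) (fun x => x) false).map
        (fun d => (PySem.List.count (rs.foldl pvStackStep []) d : Int))
      = pvFinish (rs.foldl pvRunStep (([] : List Int), (none : Option Int), (0 : Int))) := by
  cases rs with
  | nil => simp [PySem.Set.ofList, PySem.List.sorted, pvFinish]
  | cons r rest =>
    have hscan := List.pairwise_cons.mp (pvScan_pairwise rest r)
    have hstack : (r :: rest).foldl pvStackStep [] = r :: pvScan r rest := by
      rw [List.foldl_cons]
      have h1 : pvStackStep [] r = [r] := by simp [pvStackStep]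
      rw [h1, pvStack_eq rest [r] r (by simp)]
      simp
    have hrun : (r :: rest).foldl pvRunStep (([] : List Int), (none : Option Int), (0 : Int))
        = rest.foldl pvRunStep (([] : List Int), some r, (1 : Int)) := by
      rw [List.foldl_cons]
      simp [pvRunStep]
    rw [hstack, hrun, pvRun_eq rest [] r 1 (by norm_num)]
    rw [pvSorted_set_cons r (pvScan r rest) hscan.1]
    rw [pvCount_eq (pvScan r rest) r 1 hscan.2 hscan.1]
    simp only [List.nil_append, List.map_cons, PySem.List.count_eq]
    congr 1
    · rw [List.count_cons_self]; push_cast; ring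
    · apply List.map_congr_left
      intro d hd
      rw [PySem.List.mem_sorted, PySem.Set.mem_ofList, List.mem_filter] at hd
      have : r ≠ d := by have := hd.2; simp at this; omega
      rw [List.count_cons_of_ne (by simpa using this)]

-- ===== VERDICT (by name: the statement is the Claim_ definition above) =====
theorem solution_spec : Claim_equal_solution := by
  intro progresses speeds _hdom _hpre
  show solution progresses speeds = solution_alt progresses speeds
  unfold solution solution_alt
  have hrem : (progresses.zip speeds).foldl (fun acc ps => acc ++ [pvRemainA ps.1 ps.2]) ([] : List Int)
      = (progresses.zip speeds).map (fun ps => pvRemainA ps.1 ps.2) := by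
    rw [PySem.List.foldl_append_singleton_eq_map, List.nil_append]
  rw [hrem]
  rw [PySem.List.foldl_append_singleton_eq_map, List.nil_append]
  have hB : (progresses.zip speeds).foldl (fun st ps => pvRunStep st (pvRemainB ps.1 ps.2))
        (([] : List Int), (none : Option Int), (0 : Int))
      = ((progresses.zip speeds).map (fun ps => pvRemainA ps.1 ps.2)).foldl pvRunStep
        (([] : List Int), (none : Option Int), (0 : Int)) :=
    (List.foldl_map (f := fun ps : Int × Int => pvRemainA ps.1 ps.2) (g := pvRunStep)).symm
  rw [hB]
  exact Eq.trans (pvMain ((progresses.zip speeds).map (fun ps => pvRemainA ps.1 ps.2))) rfl
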